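-- pv_equiv track=rewrite | github.com/pratyaksh12/AI-Writing-Detector | AI-Writing-Detector/scraping/src/main.py | filter_paragraphs
-- ===== SOURCE A (Python) =====
-- from typing import List, Optional, Set, Dict, Any;
--
-- END_SECTIONS: Set[str] = {
--      "See also", "References", "Further reading", "External links", "Notes",
--     "Bibliography", "Works"
-- }
--
-- def filter_paragraphs(paragraphs: List[str], min_length: int = 150) -> List[str]:
--     result: List[str] = []
--     for p in paragraphs:
--         if p in END_SECTIONS: break
--         if len(p) < min_length: continue
--         if p and p[0].islower(): continue
--         if "doi:10." in p or "ISBN " in p: continue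
--         result.append(p)
--     return result
-- ===== SOURCE B (Python) =====
-- from typing import List, Set
--
-- END_SECTIONS: Set[str] = {
--      "See also", "References", "Further reading", "External links", "Notes",
--     "Bibliography", "Works"
-- }
--
-- def filter_paragraphs(paragraphs: List[str], min_length: int = 150) -> List[str]:
--     # One right-to-left scan building the result back-to-front.  A sentinel
--     # heading DISCARDS everything accumulated so far; since the scan runs from
--     # the right, the leftmost sentinel is processed last and so drops every
--     # paragraph after it -- exactly the 'break' semantics, with no cutoff search.
--     acc: List[str] = []
--     for p in reversed(paragraphs):
--         if p in END_SECTIONS: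
--             acc = []
--         elif (len(p) >= min_length
--               and not (p and p[0].islower())
--               and "doi:10." not in p
--               and "ISBN " not in p):
--             acc = [p] + acc
--     return acc
-- ===== Notes on version B (the rewrite author's own statement) =====
-- stated objective: alternative
-- what changed: Replaces the forward break/continue loop by a single right-to-left fold that builds the result back-to-front and resets its accumulator on each END_SECTIONS heading, so the leftmost sentinel (processed last) discards everything after it; no break, no cutoff index, opposite traversal order.
import Mathlib
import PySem

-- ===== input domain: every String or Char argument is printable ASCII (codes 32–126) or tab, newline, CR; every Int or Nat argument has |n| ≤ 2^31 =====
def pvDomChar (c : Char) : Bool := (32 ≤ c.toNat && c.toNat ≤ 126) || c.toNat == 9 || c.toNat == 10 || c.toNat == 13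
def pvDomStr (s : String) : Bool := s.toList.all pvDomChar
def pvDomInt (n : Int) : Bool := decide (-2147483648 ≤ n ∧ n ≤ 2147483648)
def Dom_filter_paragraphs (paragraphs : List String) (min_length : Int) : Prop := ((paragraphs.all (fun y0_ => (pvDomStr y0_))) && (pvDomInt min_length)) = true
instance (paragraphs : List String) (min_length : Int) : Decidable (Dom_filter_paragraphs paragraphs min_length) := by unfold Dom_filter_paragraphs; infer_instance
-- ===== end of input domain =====

-- B replaces A's forward break/continue loop by a single right-to-left fold that
-- builds the result back-to-front and resets on sentinels (objective: alternative).

-- ===== PORT A =====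
def pvEndSections : List String :=
  ["See also", "References", "Further reading", "External links", "Notes",
   "Bibliography", "Works"]

-- 'p and p[0].islower()' (p nonempty, first char lowercase)
def pvFirstLower (p : String) : Bool :=
  match p.toList with
  | [] => false
  | c :: _ => PySem.Chars.islower c

-- the for-loop of A: break on END_SECTIONS, continue on the three filters, else append
def pvLoopA : List String → Int → List String → List String
  | [], _, result => result
  | p :: rest, min_length, result =>
    if pvEndSections.contains p then result
    else if PySem.Str.len p < min_length then pvLoopA rest min_length result
    else if pvFirstLower p then pvLoopA rest min_length result
    else if PySem.Str.isIn "doi:10." p || PySem.Str.isIn "ISBN " p then pvLoopA rest min_length result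
    else pvLoopA rest min_length (result ++ [p])

def filter_paragraphs (paragraphs : List String) (min_length : Int) : List String :=
  pvLoopA paragraphs min_length []

-- ===== PORT B =====
-- the elif-chain of Source B's reverse loop: keep p iff it passes the three filters
def pvKeep (min_length : Int) (p : String) : Bool :=
  decide (min_length ≤ PySem.Str.len p) && !pvFirstLower p
    && !PySem.Str.isIn "doi:10." p && !PySem.Str.isIn "ISBN " p

-- Source B's 'for p in reversed(paragraphs)' accumulator loop, as a right fold:
-- a sentinel resets acc to [], a kept paragraph is consed on the front
def filter_paragraphs_alt (paragraphs : List String) (min_length : Int) : List String :=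
  paragraphs.foldr
    (fun p acc =>
      if pvEndSections.contains p then []
      else if pvKeep min_length p then p :: acc
      else acc) []

-- ===== PRECONDITION & SPEC =====
def Spec_filter_paragraphs (paragraphs : List String) (min_length : Int) (out : List String) : Prop := out = filter_paragraphs_alt paragraphs min_length
instance (paragraphs : List String) (min_length : Int) (out : List String) : Decidable (Spec_filter_paragraphs paragraphs min_length out) := by unfold Spec_filter_paragraphs; infer_instance

-- ===== CLAIM (what is proved, stated in full; the proofs are below) =====
def Claim_equal_filter_paragraphs : Prop := ∀ (paragraphs : List String) (min_length : Int), Dom_filter_paragraphs paragraphs min_length → Spec_filter_paragraphs paragraphs min_length (filter_paragraphs paragraphs min_length)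

-- ===== LEMMAS AND PROOFS =====

theorem pvLoopA_eq (l : List String) (m : Int) : ∀ (res : List String),
    pvLoopA l m res = res ++ filter_paragraphs_alt l m := by
  induction l with
  | nil => intro res; simp [pvLoopA, filter_paragraphs_alt]
  | cons p rest ih =>
    intro res
    simp only [pvLoopA, filter_paragraphs_alt, List.foldr_cons]
    by_cases hend : pvEndSections.contains p = true
    · rw [if_pos hend, if_pos hend]; simp
    · rw [if_neg hend, if_neg hend]
      by_cases h1 : PySem.Str.len p < m
      · rw [if_pos h1, ih res]
        have hk : pvKeep m p = false := by
          unfold pvKeep; rw [decide_eq_false (by omega : ¬ m ≤ PySem.Str.len p)]; simp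
        rw [hk]; simp [filter_paragraphs_alt]
      · rw [if_neg h1]
        by_cases h2 : pvFirstLower p = true
        · rw [if_pos h2, ih res]
          have hk : pvKeep m p = false := by unfold pvKeep; rw [h2]; simp
          rw [hk]; simp [filter_paragraphs_alt]
        · rw [if_neg h2]
          have h2' : pvFirstLower p = false := by revert h2; cases pvFirstLower p <;> simp
          by_cases h3 : (PySem.Str.isIn "doi:10." p || PySem.Str.isIn "ISBN " p) = true
          · rw [if_pos h3, ih res]
            have hk : pvKeep m p = false := by
              simp only [Bool.or_eq_true] at h3
              unfold pvKeep
              rcases h3 with h | h <;> rw [h] <;> simp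
            rw [hk]; simp [filter_paragraphs_alt]
          · rw [if_neg h3, ih (res ++ [p])]
            simp only [Bool.or_eq_true, not_or, Bool.not_eq_true] at h3
            have hk : pvKeep m p = true := by
              unfold pvKeep
              rw [decide_eq_true (by omega : m ≤ PySem.Str.len p), h2', h3.1, h3.2]
              rfl
            rw [hk]; simp [filter_paragraphs_alt]

-- ===== VERDICT (by name: the statement is the Claim_ definition above) =====
theorem filter_paragraphs_spec : Claim_equal_filter_paragraphs := by
  intro paragraphs min_length _
  unfold Spec_filter_paragraphs filter_paragraphs
  simpa using pvLoopA_eq paragraphs min_length []
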